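-- pv_equiv track=rewrite | github.com/kroq86/honeybadger | training/next2_effect_export.py | parse_prompt_instructions
-- ===== SOURCE A (Python) =====
-- def parse_prompt_instructions(prompt: str) -> dict[str, str]:
--     lines = prompt.strip().splitlines()
--     parsed: dict[str, str] = {}
--     current: str | None = None
--     for line in lines:
--         stripped = line.strip()
--         if stripped in {"E1", "E2"}:
--             current = stripped
--             continue
--         if current and stripped:
--             parsed[current] = stripped
--             current = None
--     return parsed
-- ===== SOURCE B (Python) =====
-- def parse_prompt_instructions(prompt: str) -> dict[str, str]:
--     tokens = [t for t in (line.strip() for line in prompt.strip().splitlines()) if t]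
--     parsed: dict[str, str] = {}
--     for i, tok in enumerate(tokens):
--         if tok in ("E1", "E2") and i + 1 < len(tokens) and tokens[i + 1] not in ("E1", "E2"):
--             parsed[tok] = tokens[i + 1]
--     return parsed
-- ===== Notes on version B (the rewrite author's own statement) =====
-- stated objective: alternative
-- what changed: Replaces A's single stateful pass with a mutable pending-label variable by first building the list of non-empty stripped tokens and then a look-ahead pass that assigns tokens[i+1] to a label token when the next token exists and is not itself a label.
import Mathlib
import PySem

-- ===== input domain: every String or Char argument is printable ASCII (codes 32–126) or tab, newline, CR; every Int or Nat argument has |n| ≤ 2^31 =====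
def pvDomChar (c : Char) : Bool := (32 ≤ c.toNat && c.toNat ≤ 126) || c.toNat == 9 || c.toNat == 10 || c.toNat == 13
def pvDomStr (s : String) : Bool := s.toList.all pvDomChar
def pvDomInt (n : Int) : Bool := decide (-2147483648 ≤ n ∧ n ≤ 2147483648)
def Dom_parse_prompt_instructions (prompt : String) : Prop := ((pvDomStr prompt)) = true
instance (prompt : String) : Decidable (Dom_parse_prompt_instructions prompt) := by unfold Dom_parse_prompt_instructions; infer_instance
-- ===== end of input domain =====

-- B replaces A's stateful current-label loop by first filtering the non-empty stripped
-- lines and then a single look-ahead pass over that token list (objective: alternative).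

-- ===== PORT A =====
-- the for-loop of A over the lines, state = (parsed dict, current label)
def pvGoA (d : PySem.Dict String String) (cur : Option String) :
    List String → PySem.Dict String String
  | [] => d
  | l :: rest =>
    let s := PySem.Str.strip l
    if s = "E1" ∨ s = "E2" then pvGoA d (some s) rest
    else
      match cur with
      | some c => if c ≠ "" ∧ s ≠ "" then pvGoA (d.insert c s) none rest
                  else pvGoA d (some c) rest
      | none => pvGoA d none rest

def parse_prompt_instructions (prompt : String) : List (String × String) :=
  (pvGoA PySem.Dict.empty none (PySem.Str.splitlines (PySem.Str.strip prompt))).items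

-- ===== PORT B =====
-- the indexed look-ahead loop of B over the non-empty tokens: at a label, assign the
-- next token unless it is itself a label (or absent)
def pvGoB (d : PySem.Dict String String) : List String → PySem.Dict String String
  | [] => d
  | [_] => d
  | t :: u :: rest =>
    pvGoB (if (t = "E1" ∨ t = "E2") ∧ ¬(u = "E1" ∨ u = "E2") then d.insert t u else d)
      (u :: rest)

def parse_prompt_instructions_alt (prompt : String) : List (String × String) :=
  let tokens :=
    ((PySem.Str.splitlines (PySem.Str.strip prompt)).map PySem.Str.strip).filter
      (fun t => t ≠ "")
  (pvGoB PySem.Dict.empty tokens).items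

-- ===== PRECONDITION & SPEC =====
def Spec_parse_prompt_instructions (prompt : String) (out : List (String × String)) : Prop := out = parse_prompt_instructions_alt prompt
instance (prompt : String) (out : List (String × String)) : Decidable (Spec_parse_prompt_instructions prompt out) := by unfold Spec_parse_prompt_instructions; infer_instance

-- ===== CLAIM (what is proved, stated in full; the proofs are below) =====
def Claim_equal_parse_prompt_instructions : Prop := ∀ (prompt : String), Dom_parse_prompt_instructions prompt → Spec_parse_prompt_instructions prompt (parse_prompt_instructions prompt)

-- ===== LEMMAS AND PROOFS =====
-- proof-side intermediate: A's stateful loop read over the already-filtered tokens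
def pvGoT (d : PySem.Dict String String) (cur : Option String) :
    List String → PySem.Dict String String
  | [] => d
  | t :: rest =>
    if t = "E1" ∨ t = "E2" then pvGoT d (some t) rest
    else
      match cur with
      | some c => if c ≠ "" then pvGoT (d.insert c t) none rest
                  else pvGoT d (some c) rest
      | none => pvGoT d none rest

-- A's loop over the raw lines equals the same loop over the filtered stripped tokens
theorem pvGoA_eq_goT (lines : List String) (d : PySem.Dict String String)
    (cur : Option String) :
    pvGoA d cur lines = pvGoT d cur ((lines.map PySem.Str.strip).filter (fun t => t ≠ "")) := by
  induction lines generalizing d cur with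
  | nil => simp [pvGoA, pvGoT]
  | cons l rest ih =>
    simp only [pvGoA, List.map_cons, List.filter_cons]
    by_cases hlab : PySem.Str.strip l = "E1" ∨ PySem.Str.strip l = "E2"
    · have hne : PySem.Str.strip l ≠ "" := by rcases hlab with h | h <;> simp [h]
      simp [hlab, hne, pvGoT, ih]
    · by_cases hemp : PySem.Str.strip l = ""
      · -- empty token: filtered out, and A's loop leaves all state unchanged
        cases cur with
        | none => simp [hemp, ih]
        | some c => simp [hemp, ih]
      · cases cur with
        | none => simp [hlab, hemp, pvGoT, ih]
        | some c =>
          by_cases hc : c = ""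
          · simp [hlab, hemp, hc, pvGoT, ih]
          · simp [hlab, hemp, hc, pvGoT, ih]

-- the pending-label view of B's look-ahead loop
def pvPend (d : PySem.Dict String String) (c : String) :
    List String → PySem.Dict String String
  | [] => d
  | t :: _ => if t = "E1" ∨ t = "E2" then d else d.insert c t

-- main invariant: on non-empty tokens the stateful loop and the look-ahead loop agree,
-- a pending label c behaving as an insertion decided by the next token
theorem pvGoT_eq_goB (tokens : List String) (h : ∀ t ∈ tokens, t ≠ "") :
    ∀ d : PySem.Dict String String,
      pvGoT d none tokens = pvGoB d tokens ∧
      ∀ c, (c = "E1" ∨ c = "E2") →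
        pvGoT d (some c) tokens = pvGoB (pvPend d c tokens) tokens := by
  induction tokens with
  | nil => intro d; exact ⟨rfl, fun c _ => rfl⟩
  | cons t rest ih =>
    intro d
    have ht : t ≠ "" := h t (by simp)
    have hrest : ∀ x ∈ rest, x ≠ "" := fun x hx => h x (by simp [hx])
    have goB_skip : ∀ d' : PySem.Dict String String, ¬(t = "E1" ∨ t = "E2") →
        pvGoB d' (t :: rest) = pvGoB d' rest := by
      intro d' hnl
      cases rest with
      | nil => simp [pvGoB]
      | cons u rs => simp [pvGoB, hnl]
    have goB_lab : ∀ d' : PySem.Dict String String, (t = "E1" ∨ t = "E2") →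
        pvGoB d' (t :: rest) = pvGoB (pvPend d' t rest) rest := by
      intro d' hl
      cases rest with
      | nil => simp [pvGoB, pvPend]
      | cons u rs =>
        by_cases hu : u = "E1" ∨ u = "E2"
        · simp [pvGoB, pvPend, hl, hu]
        · simp [pvGoB, pvPend, hl, hu]
    constructor
    · by_cases hl : t = "E1" ∨ t = "E2"
      · rw [pvGoT, if_pos hl, (ih hrest d).2 t hl, goB_lab d hl]
      · rw [pvGoT, if_neg hl, (ih hrest d).1, goB_skip d hl]
    · intro c hc
      have hcne : c ≠ "" := by rcases hc with h' | h' <;> simp [h']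
      by_cases hl : t = "E1" ∨ t = "E2"
      · rw [pvGoT, if_pos hl, (ih hrest d).2 t hl]
        show _ = pvGoB (pvPend d c (t :: rest)) (t :: rest)
        rw [show pvPend d c (t :: rest) = d from by simp [pvPend, hl], goB_lab d hl]
      · rw [pvGoT, if_neg hl]
        simp only [hcne, ne_eq, not_false_iff, if_pos]
        rw [(ih hrest (d.insert c t)).1]
        show _ = pvGoB (pvPend d c (t :: rest)) (t :: rest)
        rw [show pvPend d c (t :: rest) = d.insert c t from by simp [pvPend, hl],
          goB_skip _ hl]

-- ===== VERDICT (by name: the statement is the Claim_ definition above) =====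
theorem parse_prompt_instructions_spec : Claim_equal_parse_prompt_instructions := by
  intro prompt _
  show parse_prompt_instructions prompt = parse_prompt_instructions_alt prompt
  have hne : ∀ t ∈ ((PySem.Str.splitlines (PySem.Str.strip prompt)).map
      PySem.Str.strip).filter (fun t => t ≠ ""), t ≠ "" :=
    fun t hx => of_decide_eq_true (List.mem_filter.mp hx).2
  have h2 := (pvGoT_eq_goB _ hne PySem.Dict.empty).1
  rw [parse_prompt_instructions, parse_prompt_instructions_alt, pvGoA_eq_goT, h2]
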